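-- pv_equiv track=rewrite | github.com/kaushal-shivaprakashan/VTU-LAB-AI-ML | 2.py | computeMinimumCostChildNodes
-- ===== SOURCE A (Python) =====
-- def computeMinimumCostChildNodes(n, h, g):
--     minCost = 0
--
--     costToChildNode = {}
--     costToChildNode[minCost] = []
--
--     flag = True
--     for nodeInfoTupleList in g[n]:
--         cost = 0
--         nodeList = []
--
--         for c, w in nodeInfoTupleList:
--             cost = cost + h[c] + w
--             nodeList.append(c)
--
--         if flag == True:
--             minCost = cost
--             costToChildNode[minCost] = nodeList
--             flag=False
--
--         else:
--             if minCost > cost: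
--                 minCost = cost
--                 costToChildNode[minCost] = nodeList
--
--     return minCost, costToChildNode[minCost]
-- ===== SOURCE B (Python) =====
-- def computeMinimumCostChildNodes(n, h, g):
--     branches = g[n]
--     costs = [sum(h[c] + w for c, w in tl) for tl in branches]
--     if not costs:
--         return 0, []
--     m = min(costs)
--     return m, [c for c, _ in branches[costs.index(m)]]
-- ===== Notes on version B (the rewrite author's own statement) =====
-- stated objective: alternative
-- what changed: Replaces the running-min loop that carries the node list and a cost-keyed dict by two staged passes: first compute only the bare cost of every branch, then take min(costs), locate the first branch achieving it with costs.index, and build the node list for that single branch only.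
import Mathlib
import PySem

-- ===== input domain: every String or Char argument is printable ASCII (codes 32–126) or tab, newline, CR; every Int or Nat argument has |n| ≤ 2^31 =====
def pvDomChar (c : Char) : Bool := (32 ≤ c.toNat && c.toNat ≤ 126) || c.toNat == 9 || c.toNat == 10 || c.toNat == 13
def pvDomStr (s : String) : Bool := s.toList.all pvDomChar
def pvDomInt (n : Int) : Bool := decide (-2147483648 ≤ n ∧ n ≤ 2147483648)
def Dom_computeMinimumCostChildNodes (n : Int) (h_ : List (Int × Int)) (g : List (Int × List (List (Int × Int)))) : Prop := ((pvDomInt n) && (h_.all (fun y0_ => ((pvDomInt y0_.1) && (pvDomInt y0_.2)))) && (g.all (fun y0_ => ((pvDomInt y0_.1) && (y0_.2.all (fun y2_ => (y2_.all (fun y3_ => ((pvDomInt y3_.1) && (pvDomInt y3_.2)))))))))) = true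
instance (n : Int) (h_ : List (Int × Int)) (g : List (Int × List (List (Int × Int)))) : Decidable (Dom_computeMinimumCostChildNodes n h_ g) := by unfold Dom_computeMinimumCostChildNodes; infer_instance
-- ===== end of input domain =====

-- B replaces A's running-min loop (flag + cost-keyed dict, node list carried along) by two
-- staged passes: compute every branch's bare cost, take min(costs), then locate the first
-- branch achieving it with costs.index and build only its node list. Return value only.

-- dict lookup on an association list (first match), with a default used only outside Pre_
def pvLookupD {α : Type} (d : List (Int × α)) (k : Int) (dflt : α) : α :=
  ((d.find? (fun p => p.1 == k)).map (·.2)).getD dflt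

-- ===== PORT A =====
def computeMinimumCostChildNodes (n : Int) (h_ : List (Int × Int)) (g : List (Int × List (List (Int × Int)))) : Int × List Int :=
  -- state: (minCost, costToChildNode, flag)
  let st := (pvLookupD g n []).foldl
    (fun (st : Int × PySem.Dict Int (List Int) × Bool) tl =>
      let cw := tl.foldl (fun (p : Int × List Int) cwp =>
          (p.1 + pvLookupD h_ cwp.1 0 + cwp.2, p.2 ++ [cwp.1])) (0, [])
      if st.2.2 then (cw.1, st.2.1.insert cw.1 cw.2, false)
      else if st.1 > cw.1 then (cw.1, st.2.1.insert cw.1 cw.2, st.2.2)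
      else st)
    (0, (PySem.Dict.empty : PySem.Dict Int (List Int)).insert 0 [], true)
  (st.1, (st.2.1.get? st.1).getD [])

-- ===== PORT B =====
def pvCost (h_ : List (Int × Int)) (tl : List (Int × Int)) : Int :=
  tl.foldl (fun s cwp => s + pvLookupD h_ cwp.1 0 + cwp.2) 0

def computeMinimumCostChildNodes_alt (n : Int) (h_ : List (Int × Int)) (g : List (Int × List (List (Int × Int)))) : Int × List Int :=
  let branches := pvLookupD g n []
  let costs := branches.map (pvCost h_)
  match costs with
  | [] => (0, [])
  | c :: rest =>
      let m := (PySem.List.min? (c :: rest) (fun x => x)).getD 0          -- min(costs)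
      let i := (PySem.List.index? (c :: rest) m).getD 0                   -- costs.index(m); m ∈ costs
      (m, ((PySem.List.pyGet? branches (i : Int)).getD []).map (·.1))     -- branches[i]; i in range

-- ===== PRECONDITION & SPEC =====
-- Pre_ excludes exactly the KeyError inputs: n must be a key of g, and every child c
-- occurring in g[n] must be a key of h.
def Pre_computeMinimumCostChildNodes (n : Int) (h_ : List (Int × Int)) (g : List (Int × List (List (Int × Int)))) : Prop :=
  (g.find? (fun p => p.1 == n)).isSome = true ∧
  ∀ tl ∈ pvLookupD g n [], ∀ cw ∈ tl, (h_.find? (fun p => p.1 == cw.1)).isSome = true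
instance (n : Int) (h_ : List (Int × Int)) (g : List (Int × List (List (Int × Int)))) : Decidable (Pre_computeMinimumCostChildNodes n h_ g) := by unfold Pre_computeMinimumCostChildNodes; infer_instance

def pvWitness_computeMinimumCostChildNodes : Int × (List (Int × Int)) × (List (Int × List (List (Int × Int)))) :=
  (0, [(1, 5)], [(0, [[(1, 2)], []])])

def Spec_computeMinimumCostChildNodes (n : Int) (h_ : List (Int × Int)) (g : List (Int × List (List (Int × Int)))) (out : Int × List Int) : Prop := out = computeMinimumCostChildNodes_alt n h_ g
instance (n : Int) (h_ : List (Int × Int)) (g : List (Int × List (List (Int × Int)))) (out : Int × List Int) : Decidable (Spec_computeMinimumCostChildNodes n h_ g out) := by unfold Spec_computeMinimumCostChildNodes; infer_instance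

-- ===== CLAIM (what is proved, stated in full; the proofs are below) =====
def Claim_equal_computeMinimumCostChildNodes : Prop := ∀ (n : Int) (h_ : List (Int × Int)) (g : List (Int × List (List (Int × Int)))), Dom_computeMinimumCostChildNodes n h_ g → Pre_computeMinimumCostChildNodes n h_ g → Spec_computeMinimumCostChildNodes n h_ g (computeMinimumCostChildNodes n h_ g)

-- ===== LEMMAS AND PROOFS =====

-- proof-only: the first-wins running minimum over (cost, nodeList) pairs
def pvFw (best o : Int × List Int) : Int × List Int := if o.1 < best.1 then o else best

-- proof-only abbreviation for A's outer-loop body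
def pvStepS (h_ : List (Int × Int)) (st : Int × PySem.Dict Int (List Int) × Bool)
    (tl : List (Int × Int)) : Int × PySem.Dict Int (List Int) × Bool :=
  if st.2.2 then (pvCost h_ tl, st.2.1.insert (pvCost h_ tl) (tl.map (·.1)), false)
  else if st.1 > pvCost h_ tl then (pvCost h_ tl, st.2.1.insert (pvCost h_ tl) (tl.map (·.1)), st.2.2)
  else st

-- A's inner loop computes (running cost, accumulated node list)
lemma innerA_eq (h_ : List (Int × Int)) (tl : List (Int × Int)) (c : Int) (acc : List Int) :
    tl.foldl (fun (p : Int × List Int) cwp =>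
        (p.1 + pvLookupD h_ cwp.1 0 + cwp.2, p.2 ++ [cwp.1])) (c, acc)
      = (tl.foldl (fun s cwp => s + pvLookupD h_ cwp.1 0 + cwp.2) c, acc ++ tl.map (·.1)) := by
  induction tl generalizing c acc with
  | nil => simp
  | cons x xs ih => simp [ih]

lemma innerA_zero (h_ : List (Int × Int)) (tl : List (Int × Int)) :
    tl.foldl (fun (p : Int × List Int) cwp =>
        (p.1 + pvLookupD h_ cwp.1 0 + cwp.2, p.2 ++ [cwp.1])) (0, [])
      = (pvCost h_ tl, tl.map (·.1)) := by
  rw [innerA_eq]; simp [pvCost]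

lemma mainA_simp (h_ : List (Int × Int)) (l : List (List (Int × Int)))
    (init : Int × PySem.Dict Int (List Int) × Bool) :
    l.foldl (fun (st : Int × PySem.Dict Int (List Int) × Bool) tl =>
        let cw := tl.foldl (fun (p : Int × List Int) cwp =>
            (p.1 + pvLookupD h_ cwp.1 0 + cwp.2, p.2 ++ [cwp.1])) (0, [])
        if st.2.2 then (cw.1, st.2.1.insert cw.1 cw.2, false)
        else if st.1 > cw.1 then (cw.1, st.2.1.insert cw.1 cw.2, st.2.2)
        else st) init
    = l.foldl (pvStepS h_) init := by
  simp only [innerA_zero]; rfl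

-- invariant of A's main loop once flag is false: (minCost, dict[minCost]) is the first-wins min
lemma mainA_inv (h_ : List (Int × Int)) (l : List (List (Int × Int))) :
    ∀ (m : Int) (nl : List Int) (d : PySem.Dict Int (List Int)), d.get? m = some nl →
      (l.foldl (pvStepS h_) (m, d, false)).1
          = ((l.map (fun tl => (pvCost h_ tl, tl.map (·.1)))).foldl pvFw (m, nl)).1
      ∧ (l.foldl (pvStepS h_) (m, d, false)).2.1.get? (l.foldl (pvStepS h_) (m, d, false)).1
          = some ((l.map (fun tl => (pvCost h_ tl, tl.map (·.1)))).foldl pvFw (m, nl)).2 := by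
  induction l with
  | nil => intro m nl d hd; exact ⟨rfl, hd⟩
  | cons tl rest ih =>
    intro m nl d hd
    simp only [List.foldl_cons, List.map_cons]
    by_cases hlt : pvCost h_ tl < m
    · have hgt : m > pvCost h_ tl := hlt
      simp only [pvStepS, pvFw, if_neg (Bool.false_ne_true), if_pos hgt]
      exact ih (pvCost h_ tl) (tl.map (·.1)) _ (PySem.Dict.get?_insert_self d _ _)
    · have hgt : ¬ m > pvCost h_ tl := hlt
      simp only [pvStepS, pvFw, if_neg (Bool.false_ne_true), if_neg hgt]
      exact ih m nl d hd

-- the running minimum's key never exceeds the initial key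
lemma fw_fst_le (l : List (Int × List Int)) : ∀ o : Int × List Int, (l.foldl pvFw o).1 ≤ o.1 := by
  induction l with
  | nil => intro o; exact le_refl _
  | cons x xs ih =>
    intro o
    simp only [List.foldl_cons, pvFw]
    by_cases hx : x.1 < o.1
    · rw [if_pos hx]; exact le_trans (ih x) (le_of_lt hx)
    · rw [if_neg hx]; exact ih o

-- its key is the running min of the keys
lemma fw_fst_min (l : List (Int × List Int)) : ∀ o : Int × List Int,
    (l.foldl pvFw o).1 = (l.map (·.1)).foldl min o.1 := by
  induction l with
  | nil => intro o; rfl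
  | cons x xs ih =>
    intro o
    simp only [List.foldl_cons, List.map_cons, pvFw]
    by_cases hx : x.1 < o.1
    · rw [if_pos hx, ih x, min_eq_right (le_of_lt hx)]
    · rw [if_neg hx, ih o, min_eq_left (not_lt.mp hx)]

-- strict improvement only: if the key did not drop, the pair is unchanged
lemma fw_eq_of_fst_eq (l : List (Int × List Int)) : ∀ o : Int × List Int,
    (l.foldl pvFw o).1 = o.1 → l.foldl pvFw o = o := by
  induction l with
  | nil => intro o _; rfl
  | cons x xs ih =>
    intro o h
    simp only [List.foldl_cons, pvFw] at h ⊢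
    by_cases hx : x.1 < o.1
    · rw [if_pos hx] at h
      exact absurd (lt_of_le_of_lt (h ▸ fw_fst_le xs x) hx) (lt_irrefl _)
    · rw [if_neg hx] at h ⊢; exact ih o h
-- the result sits at the first index of its key, and is the pair stored there
lemma fw_index (l : List (Int × List Int)) : ∀ o : Int × List Int,
    ∃ i : Nat, PySem.List.index? ((o :: l).map (·.1)) (l.foldl pvFw o).1 = some i
      ∧ (o :: l)[i]? = some (l.foldl pvFw o) := by
  induction l with
  | nil =>
    intro o
    exact ⟨0, by rw [List.map_cons]; exact PySem.List.index?_cons_self _ _, rfl⟩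
  | cons x xs ih =>
    intro o
    simp only [List.foldl_cons]
    by_cases hx : x.1 < o.1
    · have hfw : pvFw o x = x := by simp [pvFw, hx]
      rw [hfw]
      obtain ⟨i, hi, hg⟩ := ih x
      have hne : o.1 ≠ (xs.foldl pvFw x).1 :=
        ne_of_gt (lt_of_le_of_lt (fw_fst_le xs x) hx)
      refine ⟨i + 1, ?_, hg⟩
      rw [List.map_cons, PySem.List.index?_cons_of_ne _ hne, hi]; rfl
    · have hfw : pvFw o x = o := by simp [pvFw, hx]
      rw [hfw]
      by_cases heq : (xs.foldl pvFw o).1 = o.1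
      · refine ⟨0, ?_, ?_⟩
        · rw [heq, List.map_cons]; exact PySem.List.index?_cons_self _ _
        · rw [fw_eq_of_fst_eq xs o heq]; rfl
      · have hlt : (xs.foldl pvFw o).1 < o.1 := lt_of_le_of_ne (fw_fst_le xs o) heq
        obtain ⟨i, hi, hg⟩ := ih o
        -- peel the head o off the ih's index
        rw [List.map_cons, PySem.List.index?_cons_of_ne _ (ne_of_gt hlt)] at hi
        obtain ⟨j, hj, rfl⟩ : ∃ j, PySem.List.index? (xs.map (·.1)) (xs.foldl pvFw o).1 = some j ∧ i = j + 1 := by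
          cases hidx : PySem.List.index? (xs.map (·.1)) (xs.foldl pvFw o).1 with
          | none => rw [hidx] at hi; cases hi
          | some j => rw [hidx] at hi; exact ⟨j, rfl, by cases hi; rfl⟩
        have hxne : x.1 ≠ (xs.foldl pvFw o).1 := ne_of_gt (lt_of_lt_of_le hlt (not_lt.mp hx))
        refine ⟨j + 2, ?_, hg⟩
        rw [List.map_cons, PySem.List.index?_cons_of_ne _ (ne_of_gt hlt), List.map_cons,
          PySem.List.index?_cons_of_ne _ hxne, hj]; rfl

-- ===== VERDICT (by name: the statement is the Claim_ definition above) =====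
theorem computeMinimumCostChildNodes_spec : Claim_equal_computeMinimumCostChildNodes := by
  intro n h_ g _ _
  unfold Spec_computeMinimumCostChildNodes computeMinimumCostChildNodes computeMinimumCostChildNodes_alt
  rw [mainA_simp]
  cases hgn : pvLookupD g n [] with
  | nil => rfl
  | cons tl rest =>
    simp only [List.foldl_cons, List.map_cons]
    set o : Int × List Int := (pvCost h_ tl, tl.map (·.1)) with ho
    set lr : List (Int × List Int) := rest.map (fun tl => (pvCost h_ tl, tl.map (·.1))) with hlr
    set r : Int × List Int := lr.foldl pvFw o with hr
    -- A's side
    obtain ⟨h1, h2⟩ := mainA_inv h_ rest (pvCost h_ tl) (tl.map (·.1))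
      (((PySem.Dict.empty : PySem.Dict Int (List Int)).insert 0 []).insert (pvCost h_ tl) (tl.map (·.1)))
      (PySem.Dict.get?_insert_self _ _ _)
    rw [show pvStepS h_ (0, (PySem.Dict.empty : PySem.Dict Int (List Int)).insert 0 [], true) tl
        = (pvCost h_ tl, ((PySem.Dict.empty : PySem.Dict Int (List Int)).insert 0 []).insert (pvCost h_ tl) (tl.map (·.1)), false) from rfl]
    rw [← hlr, ← ho, ← hr] at h1 h2
    rw [h1] at h2
    rw [h1, h2, Option.getD_some]
    -- B's side: min(costs) is r.1, costs.index finds r's position, branches[i] rebuilds r.2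
    have hcosts : List.map (pvCost h_) rest = lr.map (·.1) := by
      rw [hlr, List.map_map]; rfl
    rw [hcosts]
    have hmin : (PySem.List.min? (pvCost h_ tl :: lr.map (·.1)) (fun x => x)).getD 0 = r.1 := by
      rw [PySem.List.min?_id_cons, Option.getD_some, hr, fw_fst_min]
    rw [hmin]
    obtain ⟨i, hi, hg⟩ := fw_index lr o
    rw [List.map_cons] at hi
    have hi2 : PySem.List.index? (pvCost h_ tl :: lr.map (·.1)) r.1 = some i := hi
    rw [hi2, Option.getD_some, PySem.List.pyGet?_natCast]
    have hg2 : (tl :: rest)[i]?.map (fun tl => (pvCost h_ tl, List.map (fun x => x.1) tl)) = some r := by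
      rw [← List.getElem?_map]; exact hg
    cases htl' : (tl :: rest)[i]? with
    | none => rw [htl'] at hg2; cases hg2
    | some tl' =>
      rw [htl'] at hg2
      simp only [Option.getD_some]
      have hpair : (pvCost h_ tl', List.map (fun x => x.1) tl') = r := Option.some.inj hg2
      rw [← hpair]
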